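-- pv_equiv track=rewrite | github.com/bchwast/AGH-WDI | Kolokwia 13_14/kp_ex3.py | piatki
-- ===== SOURCE A (Python) =====
-- def piatki(num):
--     cnt = 0
--     while num > 0:
--         if num%8 == 5:
--             cnt += 1
--         num //= 8
--     #end while
--     if cnt%2 == 1:
--         return True
--     return False
-- ===== SOURCE B (Python) =====
-- def piatki(num):
--     if num <= 0:
--         return False
--     return oct(num)[2:].count('5') % 2 == 1
-- ===== Notes on version B (the rewrite author's own statement) =====
-- stated objective: simpler
-- what changed: Replaces the arithmetic digit-extraction loop with a counter by building the octal representation (oct) and counting '5' characters, returning the parity directly.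
import Mathlib
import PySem

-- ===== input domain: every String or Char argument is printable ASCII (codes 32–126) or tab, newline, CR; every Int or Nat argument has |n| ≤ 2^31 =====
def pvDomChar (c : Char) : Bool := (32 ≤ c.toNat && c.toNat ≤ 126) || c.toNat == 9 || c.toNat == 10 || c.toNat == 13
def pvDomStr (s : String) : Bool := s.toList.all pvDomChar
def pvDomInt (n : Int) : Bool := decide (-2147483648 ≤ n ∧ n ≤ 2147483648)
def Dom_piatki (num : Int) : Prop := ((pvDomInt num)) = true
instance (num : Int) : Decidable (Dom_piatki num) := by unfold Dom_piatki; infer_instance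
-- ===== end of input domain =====

-- B builds the octal digits via oct() and counts '5's; the arithmetic loop in A becomes a string count.

-- ===== PORT A =====
-- the while loop of A: state is (num, cnt); terminates since num//8 < num for num > 0
def piatkiLoop (num : Int) (cnt : Int) : Int :=
  if h : num > 0 then
    piatkiLoop (PySem.Int.floordiv num 8)
      (if PySem.Int.mod num 8 = 5 then cnt + 1 else cnt)
  else cnt
termination_by num.toNat
decreasing_by
  have := PySem.Int.floordiv_eq_ediv_of_pos (a := num) (b := 8) (by omega)
  rw [this]; omega

def piatki (num : Int) : Bool :=
  let cnt := piatkiLoop num 0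
  if PySem.Int.mod cnt 2 = 1 then true else false

-- ===== PORT B =====
-- oct(num)[2:] for num > 0: the octal digit characters, most significant first
def octDigits (n : Int) : List Char :=
  if _h : n > 0 then octDigits (n / 8) ++ [Char.ofNat (48 + (n % 8).toNat)]
  else []
termination_by n.toNat
decreasing_by omega

def piatki_alt (num : Int) : Bool :=
  if num ≤ 0 then false
  else ((octDigits num).count '5') % 2 == 1

-- ===== PRECONDITION & SPEC =====
def Spec_piatki (num : Int) (out : Bool) : Prop := out = piatki_alt num
instance (num : Int) (out : Bool) : Decidable (Spec_piatki num out) := by unfold Spec_piatki; infer_instance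

-- ===== CLAIM (what is proved, stated in full; the proofs are below) =====
def Claim_equal_piatki : Prop := ∀ (num : Int), Dom_piatki num → Spec_piatki num (piatki num)

-- ===== LEMMAS AND PROOFS =====

-- A's loop accumulates exactly the number of '5' digits in the octal expansion
lemma piatkiLoop_eq_count (num : Int) (cnt : Int) :
    piatkiLoop num cnt = cnt + ((octDigits num).count '5' : Int) := by
  by_cases h : num > 0
  case pos =>
    rw [piatkiLoop, octDigits]
    simp only [h, dite_true]
    have hfd : PySem.Int.floordiv num 8 = num / 8 :=
      PySem.Int.floordiv_eq_ediv_of_pos (by omega)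
    have hmd : PySem.Int.mod num 8 = num % 8 :=
      PySem.Int.mod_eq_emod_of_pos (by omega)
    have ih := piatkiLoop_eq_count (num / 8)
      (if PySem.Int.mod num 8 = 5 then cnt + 1 else cnt)
    rw [hfd, ih, List.count_append]
    have hm0 : 0 ≤ num % 8 := Int.emod_nonneg num (by omega)
    have hm8 : num % 8 < 8 := Int.emod_lt_of_pos num (by omega)
    simp only [hmd]
    by_cases h5 : num % 8 = 5
    · have hc : Char.ofNat (48 + (num % 8).toNat) = '5' := by rw [h5]; rfl
      rw [if_pos h5, hc]
      simp
      ring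
    · have h1 : (num % 8).toNat < 8 := by omega
      have h2 : (num % 8).toNat ≠ 5 := by omega
      have hne : Char.ofNat (48 + (num % 8).toNat) ≠ '5' := by
        set t := (num % 8).toNat with ht
        interval_cases t
        · decide
        · decide
        · decide
        · decide
        · decide
        · exact absurd rfl h2
        · decide
        · decide
      rw [if_neg h5]
      simp [hne]
  case neg =>
    rw [piatkiLoop, octDigits]
    simp [h]
termination_by num.toNat
decreasing_by
  have := PySem.Int.floordiv_eq_ediv_of_pos (a := num) (b := 8) (by omega)
  omega

-- ===== VERDICT (by name: the statement is the Claim_ definition above) =====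
theorem piatki_spec : Claim_equal_piatki := by
  intro num _
  unfold Spec_piatki piatki piatki_alt
  rw [piatkiLoop_eq_count]
  by_cases h : num ≤ 0
  · rw [octDigits]
    simp [h, PySem.Int.mod, show ¬ num > 0 by omega]
  · simp only [h, if_false]
    have hmd : PySem.Int.mod (0 + ((octDigits num).count '5' : Int)) 2
        = (0 + ((octDigits num).count '5' : Int)) % 2 :=
      PySem.Int.mod_eq_emod_of_pos (by omega)
    rw [hmd]
    set k : Nat := (octDigits num).count '5' with hk
    have : (0 + (k : Int)) % 2 = ((k % 2 : Nat) : Int) := by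
      push_cast; omega
    rw [this]
    by_cases hp : k % 2 = 1
    · simp [hp]
    · have : k % 2 = 0 := by omega
      simp [this]
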